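-- pv_equiv track=rewrite | github.com/edenuis/Python | Code Challenges/perfectNumber.py | perfectNum
-- ===== SOURCE A (Python) =====
-- def perfectNum(n):
--     count = 1
--     start = 19
--
--     while count < n:
--         start += 9
--         if start % 10 != 0:
--             count += 1
--
--     return start
-- ===== SOURCE B (Python) =====
-- def perfectNum(n):
--     m = n if n > 1 else 1
--     q, r = divmod(m - 1, 9)
--     return 19 + 9 * (10 * q + r)
-- ===== Notes on version B (the rewrite author's own statement) =====
-- stated objective: faster
-- what changed: Replaces the counting loop (step 9, skip multiples of 10) by a closed-form divmod formula exploiting that exactly one of every nine counted values crosses a multiple of 10.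
import Mathlib
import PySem

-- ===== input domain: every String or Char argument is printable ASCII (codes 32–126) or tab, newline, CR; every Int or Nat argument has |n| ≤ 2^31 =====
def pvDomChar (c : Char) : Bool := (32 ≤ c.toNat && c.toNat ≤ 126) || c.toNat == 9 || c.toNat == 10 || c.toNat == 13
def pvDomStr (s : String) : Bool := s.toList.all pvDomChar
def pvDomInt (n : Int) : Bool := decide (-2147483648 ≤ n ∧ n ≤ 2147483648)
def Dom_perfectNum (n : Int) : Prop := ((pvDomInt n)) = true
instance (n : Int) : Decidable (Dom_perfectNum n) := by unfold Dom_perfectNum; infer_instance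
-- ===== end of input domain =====

-- B replaces A's counting loop by a closed-form divmod formula (objective: faster, O(1) vs O(n)).

-- ===== PORT A =====
-- while count < n: start += 9; if start % 10 != 0: count += 1
def perfectNumLoop (n count start : Int) : Int :=
  if count < n then
    if PySem.Int.mod (start + 9) 10 ≠ 0 then
      perfectNumLoop n (count + 1) (start + 9)
    else
      perfectNumLoop n count (start + 9)
  else start
termination_by (2 * (n - count)).toNat + (if PySem.Int.mod start 10 = 1 then 1 else 0)
decreasing_by
  all_goals
    simp only [PySem.Int.mod_eq_emod_of_pos (show (0:Int) < 10 by norm_num)] at *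
  · split_ifs <;> omega
  · split_ifs <;> omega

def perfectNum (n : Int) : Int := perfectNumLoop n 1 19

-- ===== PORT B =====
def perfectNum_alt (n : Int) : Int :=
  let m := if n > 1 then n else 1
  let q := PySem.Int.floordiv (m - 1) 9
  let r := PySem.Int.mod (m - 1) 9
  19 + 9 * (10 * q + r)

-- ===== PRECONDITION & SPEC =====
def Spec_perfectNum (n : Int) (out : Int) : Prop := out = perfectNum_alt n
instance (n : Int) (out : Int) : Decidable (Spec_perfectNum n out) := by unfold Spec_perfectNum; infer_instance

-- ===== CLAIM (what is proved, stated in full; the proofs are below) =====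
def Claim_equal_perfectNum : Prop := ∀ (n : Int), Dom_perfectNum n → Spec_perfectNum n (perfectNum n)

-- ===== LEMMAS AND PROOFS =====

-- the closed form as a function of the count value
def pvG (c : Int) : Int := 19 + 9 * (10 * ((c - 1) / 9) + (c - 1) % 9)

lemma pvG_step_ne (c : Int) (h : (pvG c + 9) % 10 ≠ 0) :
    pvG c + 9 = pvG (c + 1) := by
  unfold pvG at *
  rw [show c + 1 - 1 = c from by ring]
  have h1 : 9 * ((c - 1) / 9) + (c - 1) % 9 = c - 1 := Int.mul_ediv_add_emod (c - 1) 9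
  have h2 : 0 ≤ (c - 1) % 9 := Int.emod_nonneg _ (by norm_num)
  have h3 : (c - 1) % 9 < 9 := Int.emod_lt_of_pos _ (by norm_num)
  generalize hq : (c - 1) / 9 = q at h h1
  generalize hr : (c - 1) % 9 = r at h h1 h2 h3
  interval_cases r <;> omega

lemma pvG_step_eq (c : Int) (h : (pvG c + 9) % 10 = 0) :
    pvG c + 9 + 9 = pvG (c + 1) ∧ (pvG c + 9 + 9) % 10 ≠ 0 := by
  unfold pvG at *
  rw [show c + 1 - 1 = c from by ring]
  have h1 : 9 * ((c - 1) / 9) + (c - 1) % 9 = c - 1 := Int.mul_ediv_add_emod (c - 1) 9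
  have h2 : 0 ≤ (c - 1) % 9 := Int.emod_nonneg _ (by norm_num)
  have h3 : (c - 1) % 9 < 9 := Int.emod_lt_of_pos _ (by norm_num)
  generalize hq : (c - 1) / 9 = q at h h1
  generalize hr : (c - 1) % 9 = r at h h1 h2 h3
  constructor <;> (interval_cases r <;> omega)

lemma pvLoop_g (k : Nat) : ∀ n count : Int, 1 ≤ count → (n - count).toNat ≤ k →
    perfectNumLoop n count (pvG count) = pvG (max count n) := by
  induction k with
  | zero =>
    intro n count _ hk
    rw [perfectNumLoop]
    have hnc : ¬ count < n := by omega
    rw [if_neg hnc, max_eq_left (by omega)]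
  | succ k ih =>
    intro n count hc hk
    rw [perfectNumLoop]
    by_cases hnc : count < n
    · rw [if_pos hnc]
      have hmax : max (count + 1) n = max count n := by omega
      by_cases hm : PySem.Int.mod (pvG count + 9) 10 ≠ 0
      · rw [if_pos hm]
        rw [PySem.Int.mod_eq_emod_of_pos (by norm_num)] at hm
        rw [pvG_step_ne count hm, ih n (count + 1) (by omega) (by omega), hmax]
      · rw [if_neg hm]
        rw [not_not, PySem.Int.mod_eq_emod_of_pos (by norm_num)] at hm
        obtain ⟨hg, hm2⟩ := pvG_step_eq count hm
        rw [perfectNumLoop, if_pos hnc]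
        rw [if_pos (by rw [PySem.Int.mod_eq_emod_of_pos (by norm_num)]; exact hm2)]
        rw [hg, ih n (count + 1) (by omega) (by omega), hmax]
    · rw [if_neg hnc, max_eq_left (by omega)]

lemma pvAlt_g (n : Int) : perfectNum_alt n = pvG (max 1 n) := by
  unfold perfectNum_alt pvG
  have hm : (if n > 1 then n else 1) = max 1 n := by omega
  rw [hm]
  simp only [PySem.Int.floordiv_eq_ediv_of_pos (show (0:Int) < 9 by norm_num),
      PySem.Int.mod_eq_emod_of_pos (show (0:Int) < 9 by norm_num)]

-- ===== VERDICT (by name: the statement is the Claim_ definition above) =====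
theorem perfectNum_spec : Claim_equal_perfectNum := by
  intro n _
  unfold Spec_perfectNum perfectNum
  have h19 : (19 : Int) = pvG 1 := by decide
  rw [h19, pvLoop_g (n - 1).toNat n 1 (by omega) (by omega), pvAlt_g, max_comm]
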